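-- pv_equiv track=rewrite | github.com/alan-turing-institute/cribbage-rl | mcagent/mcagent.py | two_card_fifteens
-- ===== SOURCE A (Python) =====
-- from itertools import combinations
--
-- def peg_val(card):
--     return 10 if card[0]>10 else card[0]
--
-- def two_card_fifteens(sorted5cards):
--     """
--     Returns the point value of pairs of cards that sum to 15
--     :param sorted5cards: sorted list of 4 cards in the player's hand and the cut card
--     :return: points from two card 15's
--     """
--     points=0
--     index_combinations2 = combinations([0,1,2,3,4], 2)
--     for combination in list(index_combinations2):
--         card1 = sorted5cards[combination[0]]
--         value1=peg_val(card1)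
--         card2 = sorted5cards[combination[1]]
--         value2=peg_val(card2)
--         if value1 + value2 == 15:
--             points += 2
--     return points
-- ===== SOURCE B (Python) =====
-- def peg_val(card):
--     return 10 if card[0] > 10 else card[0]
--
-- def two_card_fifteens(sorted5cards):
--     """
--     Returns the point value of pairs of cards that sum to 15
--     :param sorted5cards: sorted list of 4 cards in the player's hand and the cut card
--     :return: points from two card 15's
--     """
--     vals = [peg_val(sorted5cards[i]) for i in range(5)]
--     counts = {}
--     for v in vals:
--         counts[v] = counts.get(v, 0) + 1
--     points = 0
--     for a, b in ((5, 10), (6, 9), (7, 8)):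
--         points += 2 * counts.get(a, 0) * counts.get(b, 0)
--     return points
-- ===== Notes on version B (the rewrite author's own statement) =====
-- stated objective: simpler
-- what changed: Replaces A's scan over all 10 index pairs with a peg-value frequency table read at the three complementary value pairs (5,10),(6,9),(7,8), which are the only peg-value pairs that can sum to 15.
import Mathlib
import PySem

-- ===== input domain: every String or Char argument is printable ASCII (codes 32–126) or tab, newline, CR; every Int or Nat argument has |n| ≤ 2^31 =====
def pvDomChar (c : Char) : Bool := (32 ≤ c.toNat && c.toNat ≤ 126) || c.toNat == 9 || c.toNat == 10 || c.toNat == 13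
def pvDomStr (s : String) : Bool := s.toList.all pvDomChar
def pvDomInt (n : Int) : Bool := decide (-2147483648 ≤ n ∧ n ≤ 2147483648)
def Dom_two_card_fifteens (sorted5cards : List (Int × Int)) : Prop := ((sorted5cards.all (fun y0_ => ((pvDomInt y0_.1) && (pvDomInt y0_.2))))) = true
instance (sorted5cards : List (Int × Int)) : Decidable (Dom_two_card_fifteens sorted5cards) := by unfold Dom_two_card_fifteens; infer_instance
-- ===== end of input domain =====

-- B replaces the scan over all 10 index pairs by a peg-value frequency table read at the
-- three complementary value pairs (5,10),(6,9),(7,8); objective: simpler.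

-- ===== PORT A =====
def pegVal (card : Int × Int) : Int := if card.1 > 10 then 10 else card.1

def two_card_fifteens (sorted5cards : List (Int × Int)) : Int :=
  ([(0,1),(0,2),(0,3),(0,4),(1,2),(1,3),(1,4),(2,3),(2,4),(3,4)] : List (Int × Int)).foldl
    (fun points comb =>
      let card1 := PySem.List.pyGetD sorted5cards comb.1 (0, 0)
      let value1 := pegVal card1
      let card2 := PySem.List.pyGetD sorted5cards comb.2 (0, 0)
      let value2 := pegVal card2
      if value1 + value2 == 15 then points + 2 else points) 0

-- ===== PORT B =====
def pegValAlt (card : Int × Int) : Int := if card.1 > 10 then 10 else card.1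

def two_card_fifteens_alt (sorted5cards : List (Int × Int)) : Int :=
  let vals := (PySem.List.pyRange 0 5 1).map
    (fun i => pegValAlt (PySem.List.pyGetD sorted5cards i (0, 0)))
  let counts := vals.foldl (fun d v => d.insert v (d.getD v 0 + 1)) PySem.Dict.empty
  ([(5,10),(6,9),(7,8)] : List (Int × Int)).foldl
    (fun points p => points + 2 * counts.getD p.1 0 * counts.getD p.2 0) 0

-- ===== PRECONDITION & SPEC =====
-- Python A raises IndexError when fewer than 5 cards are given; Pre_ excludes exactly those.
def Pre_two_card_fifteens (sorted5cards : List (Int × Int)) : Prop := 5 ≤ sorted5cards.length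
instance (sorted5cards : List (Int × Int)) : Decidable (Pre_two_card_fifteens sorted5cards) := by unfold Pre_two_card_fifteens; infer_instance
def pvWitness_two_card_fifteens : (List (Int × Int)) := [(5,0),(7,1),(8,2),(11,3),(13,0)]

def Spec_two_card_fifteens (sorted5cards : List (Int × Int)) (out : Int) : Prop := out = two_card_fifteens_alt sorted5cards
instance (sorted5cards : List (Int × Int)) (out : Int) : Decidable (Spec_two_card_fifteens sorted5cards out) := by unfold Spec_two_card_fifteens; infer_instance

-- ===== CLAIM (what is proved, stated in full; the proofs are below) =====
def Claim_equal_two_card_fifteens : Prop := ∀ (sorted5cards : List (Int × Int)), Dom_two_card_fifteens sorted5cards → Pre_two_card_fifteens sorted5cards → Spec_two_card_fifteens sorted5cards (two_card_fifteens sorted5cards)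

-- ===== LEMMAS AND PROOFS =====

-- indicator helper used only in the proofs
def pvInd (w a : Int) : Int := if w = a then 1 else 0

theorem pvInd_diag (w : Int) :
    pvInd w 5 * pvInd w 10 = 0 ∧ pvInd w 6 * pvInd w 9 = 0 ∧ pvInd w 7 * pvInd w 8 = 0 := by
  unfold pvInd; split_ifs <;> omega

-- a single pair of peg values (each ≤ 10) sums to 15 iff it is one of the complementary pairs
theorem pvPair (w v : Int) (hw : w ≤ 10) (hv : v ≤ 10) :
    (if w + v = 15 then (2:Int) else 0) =
      2 * (pvInd w 5 * pvInd v 10 + pvInd w 10 * pvInd v 5 + pvInd w 6 * pvInd v 9 +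
           pvInd w 9 * pvInd v 6 + pvInd w 7 * pvInd v 8 + pvInd w 8 * pvInd v 7) := by
  have hw' : w = 5 ∨ w = 6 ∨ w = 7 ∨ w = 8 ∨ w = 9 ∨ w = 10 ∨
      (w ≠ 5 ∧ w ≠ 6 ∧ w ≠ 7 ∧ w ≠ 8 ∧ w ≠ 9 ∧ w ≠ 10) := by omega
  have hv' : v = 5 ∨ v = 6 ∨ v = 7 ∨ v = 8 ∨ v = 9 ∨ v = 10 ∨
      (v ≠ 5 ∧ v ≠ 6 ∧ v ≠ 7 ∧ v ≠ 8 ∧ v ≠ 9 ∧ v ≠ 10) := by omega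
  unfold pvInd
  rcases hw' with rfl | rfl | rfl | rfl | rfl | rfl | ⟨_,_,_,_,_,_⟩ <;>
    rcases hv' with rfl | rfl | rfl | rfl | rfl | rfl | ⟨_,_,_,_,_,_⟩ <;>
    simp_all <;> omega

theorem pegVal_le (x : Int × Int) : pegVal x ≤ 10 := by
  unfold pegVal; split_ifs <;> omega

theorem pegValAlt_eq_pegVal (x : Int × Int) : pegValAlt x = pegVal x := rfl

-- A's accumulation loop as a sum over the pair list
theorem pvFoldTwo (l : List (Int × Int)) (v : Int × Int → Int) (a : Int) :
    l.foldl (fun points c => if v c == 15 then points + 2 else points) a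
      = a + (l.map (fun c => if v c = 15 then (2:Int) else 0)).sum := by
  induction l generalizing a with
  | nil => simp
  | cons h t ih =>
    rw [List.foldl_cons, ih]
    simp only [List.map_cons, List.sum_cons, beq_iff_eq]
    split_ifs <;> ring

-- occurrence count in the 5-element value list, as a sum of indicators
theorem pvCnt (w0 w1 w2 w3 w4 a : Int) :
    ((([w0, w1, w2, w3, w4] : List Int).count a : Int)) =
      pvInd w0 a + pvInd w1 a + pvInd w2 a + pvInd w3 a + pvInd w4 a := by
  simp only [List.count_cons, List.count_nil, pvInd, beq_iff_eq]
  push_cast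
  split_ifs <;> omega

-- ===== VERDICT (by name: the statement is the Claim_ definition above) =====
theorem two_card_fifteens_spec : Claim_equal_two_card_fifteens := by
  intro xs _ hpre
  unfold Pre_two_card_fifteens at hpre
  unfold Spec_two_card_fifteens
  match xs, hpre with
  | x0 :: x1 :: x2 :: x3 :: x4 :: rest, _ =>
    unfold two_card_fifteens
    rw [pvFoldTwo _ (fun comb =>
      pegVal (PySem.List.pyGetD (x0 :: x1 :: x2 :: x3 :: x4 :: rest) comb.1 (0, 0)) +
      pegVal (PySem.List.pyGetD (x0 :: x1 :: x2 :: x3 :: x4 :: rest) comb.2 (0, 0)))]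
    simp only [two_card_fifteens_alt]
    have hvals : (PySem.List.pyRange 0 5 1).map
        (fun i => pegValAlt (PySem.List.pyGetD (x0 :: x1 :: x2 :: x3 :: x4 :: rest) i (0, 0))) =
        [pegVal x0, pegVal x1, pegVal x2, pegVal x3, pegVal x4] := by
      simp [PySem.List.pyRange, List.range_succ, PySem.List.pyGetD_ofNat', pegValAlt_eq_pegVal]
    rw [hvals, PySem.Dict.foldl_insert_getD_add_one_eq_counter]
    simp [PySem.Dict.getD_counter, PySem.List.pyGetD_ofNat']
    rw [pvCnt, pvCnt, pvCnt, pvCnt, pvCnt, pvCnt]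
    rw [pvPair (pegVal x0) (pegVal x1) (pegVal_le x0) (pegVal_le x1),
        pvPair (pegVal x0) (pegVal x2) (pegVal_le x0) (pegVal_le x2),
        pvPair (pegVal x0) (pegVal x3) (pegVal_le x0) (pegVal_le x3),
        pvPair (pegVal x0) (pegVal x4) (pegVal_le x0) (pegVal_le x4),
        pvPair (pegVal x1) (pegVal x2) (pegVal_le x1) (pegVal_le x2),
        pvPair (pegVal x1) (pegVal x3) (pegVal_le x1) (pegVal_le x3),
        pvPair (pegVal x1) (pegVal x4) (pegVal_le x1) (pegVal_le x4),
        pvPair (pegVal x2) (pegVal x3) (pegVal_le x2) (pegVal_le x3),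
        pvPair (pegVal x2) (pegVal x4) (pegVal_le x2) (pegVal_le x4),
        pvPair (pegVal x3) (pegVal x4) (pegVal_le x3) (pegVal_le x4)]
    obtain ⟨a0, b0, c0⟩ := pvInd_diag (pegVal x0)
    obtain ⟨a1, b1, c1⟩ := pvInd_diag (pegVal x1)
    obtain ⟨a2, b2, c2⟩ := pvInd_diag (pegVal x2)
    obtain ⟨a3, b3, c3⟩ := pvInd_diag (pegVal x3)
    obtain ⟨a4, b4, c4⟩ := pvInd_diag (pegVal x4)
    linear_combination (-2:Int) * (a0 + a1 + a2 + a3 + a4 + b0 + b1 + b2 + b3 + b4 + c0 + c1 + c2 + c3 + c4)
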